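-- pv_equiv track=rewrite | github.com/ImaginaryBond7/review_extractor | cli/clustering.py | get_cluster_representatives
-- ===== SOURCE A (Python) =====
-- from typing import List, Dict
-- from collections import defaultdict, Counter
--
-- def get_cluster_representatives(
--     attr_to_cluster: Dict[str, int],
--     original_attrs: List[str]
-- ) -> Dict[int, str]:
--     """
--     Given mapping of attribute -> cluster_id, choose a representative for each cluster.
--     Uses original attributes list to count frequency.
--     """
--     cluster_to_attrs = defaultdict(list)
--     for attr in original_attrs:
--         cid = attr_to_cluster.get(attr, -1)
--         cluster_to_attrs[cid].append(attr)
--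
--     representatives = {}
--     for cid, attrs in cluster_to_attrs.items():
--         counts = Counter(attrs)
--         rep = sorted(counts.items(), key=lambda x: (-x[1], len(x[0])))[0][0]
--         representatives[cid] = rep
--     return representatives
-- ===== SOURCE B (Python) =====
-- from typing import List, Dict
-- from collections import Counter
--
-- def get_cluster_representatives(
--     attr_to_cluster: Dict[str, int],
--     original_attrs: List[str]
-- ) -> Dict[int, str]:
--     # One global Counter + a single arg-min pass per cluster; no per-cluster
--     # grouping lists, no per-cluster Counter, no sort.
--     counts = Counter(original_attrs)
--     best = {}  # cid -> ((-count, len(attr)), attr)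
--     for attr, cnt in counts.items():
--         cid = attr_to_cluster.get(attr, -1)
--         key = (-cnt, len(attr))
--         if cid not in best or key < best[cid][0]:
--             best[cid] = (key, attr)
--     return {cid: v[1] for cid, v in best.items()}
-- ===== Notes on version B (the rewrite author's own statement) =====
-- stated objective: simpler
-- what changed: Replaces the group-by-cluster dict of lists plus a per-cluster Counter and sort with one global Counter and a single arg-min pass that keeps the best (-count, len) entry per cluster id, using strict '<' so the earliest-seen attribute wins ties exactly as the stable sort does.
import Mathlib
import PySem

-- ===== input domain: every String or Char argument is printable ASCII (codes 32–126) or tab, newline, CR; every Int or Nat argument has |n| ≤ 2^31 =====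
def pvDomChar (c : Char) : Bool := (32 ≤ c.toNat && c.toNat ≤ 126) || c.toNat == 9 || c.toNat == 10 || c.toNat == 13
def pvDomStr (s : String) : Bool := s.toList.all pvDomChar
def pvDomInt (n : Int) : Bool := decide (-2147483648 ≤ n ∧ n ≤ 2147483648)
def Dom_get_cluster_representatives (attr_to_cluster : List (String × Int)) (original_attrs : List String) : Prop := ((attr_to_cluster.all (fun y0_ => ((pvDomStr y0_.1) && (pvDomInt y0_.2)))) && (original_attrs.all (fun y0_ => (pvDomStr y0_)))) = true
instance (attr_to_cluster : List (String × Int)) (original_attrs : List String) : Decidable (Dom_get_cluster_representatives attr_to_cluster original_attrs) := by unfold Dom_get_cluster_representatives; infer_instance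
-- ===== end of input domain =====

-- B replaces A's group-by-cluster lists + per-cluster Counter + sort with one global
-- Counter and a single strict-arg-min pass per cluster id (objective: simpler).


-- ===== PORT A =====
-- attr_to_cluster.get(attr, -1): the dict parameter's lookup (first match), shared by both ports
def pvLookup (attr_to_cluster : List (String × Int)) (attr : String) : Int :=
  (PySem.Dict.mk attr_to_cluster).getD attr (-1)

-- the body of A's second loop: Counter(attrs), then sorted(counts.items(), key=(-cnt, len))[0][0]
-- (the [0] cannot raise: every grouped list is nonempty, so headD's default is never used)
def pvRepA (attrs : List String) : String :=
  let counts : PySem.Dict String Int := PySem.Dict.counter attrs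
  ((PySem.List.sorted2 counts.items (fun x => -x.2) (fun x => PySem.Str.len x.1)).headD ("", 0)).1

def get_cluster_representatives (attr_to_cluster : List (String × Int)) (original_attrs : List String) : List (Int × String) :=
  let cluster_to_attrs : PySem.Dict Int (List String) :=
    original_attrs.foldl (fun d attr => d.modify (pvLookup attr_to_cluster attr) [] (fun l => l ++ [attr])) PySem.Dict.empty
  let representatives : PySem.Dict Int String :=
    cluster_to_attrs.items.foldl (fun r p => r.insert p.1 (pvRepA p.2)) PySem.Dict.empty
  representatives.items

-- ===== PORT B =====
def pvKey (p : String × Int) : Int × Int := (-p.2, PySem.Str.len p.1)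

-- Python tuple '<' on pairs of ints
def pvKeyLt (a b : Int × Int) : Bool := a.1 < b.1 || (a.1 == b.1 && a.2 < b.2)

def get_cluster_representatives_alt (attr_to_cluster : List (String × Int)) (original_attrs : List String) : List (Int × String) :=
  let counts : PySem.Dict String Int := PySem.Dict.counter original_attrs
  let best : PySem.Dict Int ((Int × Int) × String) :=
    counts.items.foldl (fun b p =>
      let cid := pvLookup attr_to_cluster p.1
      let key := pvKey p
      match b.get? cid with
      | none => b.insert cid (key, p.1)
      | some q => if pvKeyLt key q.1 then b.insert cid (key, p.1) else b) PySem.Dict.empty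
  (best.items.foldl (fun d p => d.insert p.1 p.2.2) (PySem.Dict.empty : PySem.Dict Int String)).items

-- ===== PRECONDITION & SPEC =====
def Spec_get_cluster_representatives (attr_to_cluster : List (String × Int)) (original_attrs : List String) (out : List (Int × String)) : Prop := out = get_cluster_representatives_alt attr_to_cluster original_attrs
instance (attr_to_cluster : List (String × Int)) (original_attrs : List String) (out : List (Int × String)) : Decidable (Spec_get_cluster_representatives attr_to_cluster original_attrs out) := by unfold Spec_get_cluster_representatives; infer_instance

-- ===== CLAIM (what is proved, stated in full; the proofs are below) =====
def Claim_equal_get_cluster_representatives : Prop := ∀ (attr_to_cluster : List (String × Int)) (original_attrs : List String), Dom_get_cluster_representatives attr_to_cluster original_attrs → Spec_get_cluster_representatives attr_to_cluster original_attrs (get_cluster_representatives attr_to_cluster original_attrs)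


-- ===== LEMMAS AND PROOFS =====

-- ---- proof-only helpers ----

-- B's per-cluster step and the pure "running arg-min" it maintains
def pvStepB (p : String × Int) (o : Option ((Int × Int) × String)) : (Int × Int) × String :=
  match o with
  | none => (pvKey p, p.1)
  | some q => if pvKeyLt (pvKey p) q.1 then (pvKey p, p.1) else q

def pvOptFold (o : Option ((Int × Int) × String)) (l : List (String × Int)) : Option ((Int × Int) × String) :=
  l.foldl (fun o p => some (pvStepB p o)) o

def pvBodyB (m : List (String × Int)) (b : PySem.Dict Int ((Int × Int) × String)) (p : String × Int) : PySem.Dict Int ((Int × Int) × String) :=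
  let cid := pvLookup m p.1
  let key := pvKey p
  match b.get? cid with
  | none => b.insert cid (key, p.1)
  | some q => if pvKeyLt key q.1 then b.insert cid (key, p.1) else b

-- the strict-before test used by A's sorted2 key (-count, len)
def pvBefore (x q : String × Int) : Bool :=
  decide (-x.2 < -q.2) || (!decide (-q.2 < -x.2) && decide (PySem.Str.len x.1 < PySem.Str.len q.1))

def pvMinA (q : String × Int) (l : List (String × Int)) : String × Int :=
  l.foldl (fun m x => if pvBefore x m then x else m) q

def pvMinB (r : (Int × Int) × String) (l : List (String × Int)) : (Int × Int) × String :=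
  l.foldl (fun r p => if pvKeyLt (pvKey p) r.1 then (pvKey p, p.1) else r) r

-- ---- lemmas ----

lemma pvBefore_eq (x q : String × Int) : pvBefore x q = pvKeyLt (pvKey x) (pvKey q) := by
  simp only [pvBefore, pvKeyLt, pvKey]
  by_cases h1 : -x.2 < -q.2 <;> by_cases h2 : -q.2 < -x.2 <;>
    simp [h1, h2] <;> omega

lemma pvHead_insertBy (bf : (String × Int) → (String × Int) → Bool) :
    ∀ (l acc : List (String × Int)),
      (l.foldl (fun acc x => PySem.List.insertBy bf x acc) acc).head? =
        l.foldl (fun o x => some (match o with | none => x | some q => if bf x q then x else q)) acc.head? := by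
  intro l
  induction l with
  | nil => intro acc; rfl
  | cons x t ih =>
    intro acc
    have hstep : (PySem.List.insertBy bf x acc).head? =
        some (match acc.head? with | none => x | some q => if bf x q then x else q) := by
      cases acc with
      | nil => rfl
      | cons m r =>
        simp only [PySem.List.insertBy]
        split <;> simp_all
    simp only [List.foldl_cons, ih, hstep]

lemma pvFoldA_some (l : List (String × Int)) (q : String × Int) :
    l.foldl (fun o x => some (match o with | none => x | some r => if pvBefore x r then x else r)) (some q)
      = some (pvMinA q l) := by
  induction l generalizing q with
  | nil => rfl
  | cons x t ih => simp only [pvMinA, List.foldl_cons] at *; exact ih _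

lemma pvFoldB_some (l : List (String × Int)) (r : (Int × Int) × String) :
    pvOptFold (some r) l = some (pvMinB r l) := by
  induction l generalizing r with
  | nil => rfl
  | cons x t ih => simp only [pvOptFold, pvMinB, pvStepB, List.foldl_cons] at *; exact ih _

lemma pvMin_link (l : List (String × Int)) : ∀ (q : String × Int),
    pvMinB (pvKey q, q.1) l = (pvKey (pvMinA q l), (pvMinA q l).1) := by
  induction l with
  | nil => intro q; rfl
  | cons x t ih =>
    intro q
    simp only [pvMinB, pvMinA, List.foldl_cons] at *
    rw [pvBefore_eq]
    by_cases h : pvKeyLt (pvKey x) (pvKey q) <;> simp [h] <;> exact ih _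
lemma pvBfold (m : List (String × Int)) :
    ∀ (l : List (String × Int)) (d : PySem.Dict Int ((Int × Int) × String)),
      (l.foldl (pvBodyB m) d).keys = PySem.Set.update d.keys (l.map (fun p => pvLookup m p.1)) ∧
      ∀ c, (l.foldl (pvBodyB m) d).get? c = pvOptFold (d.get? c) (l.filter (fun p => pvLookup m p.1 == c)) := by
  intro l
  induction l with
  | nil => intro d; exact ⟨rfl, fun c => rfl⟩
  | cons p t ih =>
    intro d
    obtain ⟨ihk, ihg⟩ := ih (pvBodyB m d p)
    have hkeys : (pvBodyB m d p).keys = PySem.Set.add d.keys (pvLookup m p.1) := by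
      simp only [pvBodyB]
      cases h : d.get? (pvLookup m p.1) with
      | none =>
        have hc : d.contains (pvLookup m p.1) = false :=
          (PySem.Dict.get?_eq_none_iff_contains _ _).mp h
        have hmem : pvLookup m p.1 ∉ d.keys := by
          intro hm
          rw [(PySem.Dict.contains_iff_mem_keys _ _).mpr hm] at hc
          exact Bool.false_ne_true hc.symm
        rw [PySem.Dict.keys_insert_of_not_contains d _ hc]
        simp [PySem.Set.add, PySem.Set.contains, hmem]
      | some q =>
        have hc : d.contains (pvLookup m p.1) = true := by
          by_contra hne
          have := (PySem.Dict.get?_eq_none_iff_contains d (pvLookup m p.1)).mpr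
            (Bool.eq_false_iff.mpr (fun hh => hne hh))
          rw [h] at this; exact Option.some_ne_none q this
        have hmem : pvLookup m p.1 ∈ d.keys := (PySem.Dict.contains_iff_mem_keys _ _).mp hc
        have hadd : PySem.Set.add d.keys (pvLookup m p.1) = d.keys := by
          simp [PySem.Set.add, PySem.Set.contains, hmem]
        rw [hadd]
        split
        · exact PySem.Dict.keys_insert_of_contains d _ hc
        · split
          · exact PySem.Dict.keys_insert_of_contains d _ hc
          · rfl
    have hget : ∀ c, (pvBodyB m d p).get? c =
        if (pvLookup m p.1 == c) then some (pvStepB p (d.get? c)) else d.get? c := by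
      intro c
      by_cases hc : pvLookup m p.1 = c
      · subst hc
        simp only [pvBodyB, beq_self_eq_true, if_true]
        cases h : d.get? (pvLookup m p.1) with
        | none => simp [pvStepB]
        | some q =>
          simp only [pvStepB]
          by_cases hlt : pvKeyLt (pvKey p) q.1 <;>
            simp [hlt, h]
      · have hf : (pvLookup m p.1 == c) = false := beq_eq_false_iff_ne.mpr hc
        have hne : c ≠ pvLookup m p.1 := fun hh => hc hh.symm
        simp only [pvBodyB, hf, Bool.false_eq_true, if_false]
        cases h : d.get? (pvLookup m p.1) with
        | none => rw [PySem.Dict.get?_insert_of_ne d _ hne]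
        | some q =>
          split
          · rw [PySem.Dict.get?_insert_of_ne d _ hne]
          · split
            · rw [PySem.Dict.get?_insert_of_ne d _ hne]
            · rfl
    refine ⟨?_, ?_⟩
    · rw [List.foldl_cons, ihk, hkeys]; rfl
    · intro c
      rw [List.foldl_cons, ihg c, hget c, List.filter_cons]
      by_cases hc : (pvLookup m p.1 == c) = true
      · simp only [hc, if_true]; rfl
      · simp only [Bool.not_eq_true] at hc
        simp only [hc, Bool.false_eq_true, if_false]
lemma pvOfList_append_singleton {α : Type} [BEq α] (xs : List α) (x : α) :
    PySem.Set.ofList (xs ++ [x]) = PySem.Set.add (PySem.Set.ofList xs) x := by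
  simp [PySem.Set.ofList, List.foldl_append]

lemma pvOfList_map_ofList {α β : Type} [BEq α] [LawfulBEq α] [BEq β] [LawfulBEq β] (f : α → β) :
    ∀ xs : List α, PySem.Set.ofList ((PySem.Set.ofList xs).map f) = PySem.Set.ofList (xs.map f) := by
  intro xs
  induction xs using List.reverseRecOn with
  | nil => rfl
  | append_singleton l x ih =>
    rw [pvOfList_append_singleton, List.map_append, List.map_singleton, pvOfList_append_singleton]
    by_cases hx : x ∈ l
    · have h1 : PySem.Set.add (PySem.Set.ofList l) x = PySem.Set.ofList l := by
        simp [PySem.Set.add, PySem.Set.contains, (PySem.Set.mem_ofList l x).mpr hx]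
      have h2 : PySem.Set.add (PySem.Set.ofList (l.map f)) (f x) = PySem.Set.ofList (l.map f) := by
        simp [PySem.Set.add, PySem.Set.contains,
          (PySem.Set.mem_ofList (l.map f) (f x)).mpr (List.mem_map_of_mem hx)]
      rw [h1, h2, ih]
    · by_cases hmem : x ∈ PySem.Set.ofList l
      · exact absurd ((PySem.Set.mem_ofList l x).mp hmem) hx
      have h1 : PySem.Set.add (PySem.Set.ofList l) x = PySem.Set.ofList l ++ [x] := by
        simp [PySem.Set.add, PySem.Set.contains, hmem]
      rw [h1, List.map_append, List.map_singleton, pvOfList_append_singleton, ih]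

lemma pvOfList_filter {α : Type} [BEq α] [LawfulBEq α] (q : α → Bool) :
    ∀ xs : List α, PySem.Set.ofList (xs.filter q) = (PySem.Set.ofList xs).filter q := by
  intro xs
  induction xs using List.reverseRecOn with
  | nil => rfl
  | append_singleton l x ih =>
    rw [List.filter_append, pvOfList_append_singleton]
    by_cases hq : q x = true
    · simp only [List.filter_cons, List.filter_nil, hq, if_true]
      by_cases hx : x ∈ l
      · have hxf : x ∈ l.filter q := List.mem_filter.mpr ⟨hx, hq⟩
        have h1 : PySem.Set.add (PySem.Set.ofList l) x = PySem.Set.ofList l := by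
          simp [PySem.Set.add, PySem.Set.contains, (PySem.Set.mem_ofList l x).mpr hx]
        rw [h1, ih.symm]
        rw [pvOfList_append_singleton]
        simp [PySem.Set.add, PySem.Set.contains,
          (PySem.Set.mem_ofList (l.filter q) x).mpr hxf]
      · have hmem : x ∉ PySem.Set.ofList l := fun hm => hx ((PySem.Set.mem_ofList l x).mp hm)
        have hmf : x ∉ PySem.Set.ofList (l.filter q) := fun hm =>
          hx (List.mem_of_mem_filter ((PySem.Set.mem_ofList (l.filter q) x).mp hm))
        have h1 : PySem.Set.add (PySem.Set.ofList l) x = PySem.Set.ofList l ++ [x] := by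
          simp [PySem.Set.add, PySem.Set.contains, hmem]
        rw [h1, List.filter_append, ih.symm, pvOfList_append_singleton]
        simp [PySem.Set.add, PySem.Set.contains, hmf, hq]
    · have hq' : q x = false := Bool.eq_false_iff.mpr hq
      simp only [List.filter_cons, List.filter_nil, hq', Bool.false_eq_true, if_false,
        List.append_nil]
      by_cases hx : x ∈ PySem.Set.ofList l
      · have h1 : PySem.Set.add (PySem.Set.ofList l) x = PySem.Set.ofList l := by
          simp [PySem.Set.add, PySem.Set.contains, hx]
        rw [h1, ih]
      · have h1 : PySem.Set.add (PySem.Set.ofList l) x = PySem.Set.ofList l ++ [x] := by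
          simp [PySem.Set.add, PySem.Set.contains, hx]
        rw [h1, List.filter_append, ih]
        simp [hq']
lemma pvLc_eq (m : List (String × Int)) (orig : List String) (c : Int) :
    (PySem.Dict.counter (orig.filter (fun a => pvLookup m a == c))).items
      = ((PySem.Set.ofList orig).filter (fun a => pvLookup m a == c)).map
          (fun a => (a, (orig.count a : Int))) := by
  rw [PySem.Dict.items_counter, pvOfList_filter]
  refine List.map_congr_left ?_
  intro a ha
  have hq : (pvLookup m a == c) = true := (List.mem_filter.mp ha).2
  rw [List.count_filter (p := fun a => pvLookup m a == c) hq]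

lemma pvValue (m : List (String × Int)) (orig : List String) (c : Int)
    (h : c ∈ orig.map (fun a => pvLookup m a)) :
    ∃ v : (Int × Int) × String,
      pvOptFold none (((PySem.Set.ofList orig).filter (fun a => pvLookup m a == c)).map
          (fun a => (a, (orig.count a : Int)))) = some v ∧
      pvRepA (orig.filter (fun a => pvLookup m a == c)) = v.2 := by
  obtain ⟨a, ha, hfa⟩ := List.mem_map.mp h
  have hq : (pvLookup m a == c) = true := by simp [hfa]
  have haM : a ∈ (PySem.Set.ofList orig).filter (fun a => pvLookup m a == c) :=
    List.mem_filter.mpr ⟨(PySem.Set.mem_ofList orig a).mpr ha, hq⟩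
  obtain ⟨x, t, hM⟩ := List.exists_cons_of_ne_nil (List.ne_nil_of_mem haM)
  refine ⟨pvMinB (pvKey ((fun a => (a, (orig.count a : Int))) x), x)
      (t.map (fun a => (a, (orig.count a : Int)))), ?_, ?_⟩
  · rw [hM, List.map_cons]
    show pvOptFold (some (pvKey ((fun a => (a, (orig.count a : Int))) x), x))
        (t.map (fun a => (a, (orig.count a : Int)))) = _
    rw [pvFoldB_some]
  · simp only [pvRepA]
    rw [pvLc_eq, hM, List.map_cons]
    have hs : ∀ l : List (String × Int),
        PySem.List.sorted2 l (fun x => -x.2) (fun x => PySem.Str.len x.1)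
          = l.foldl (fun acc x => PySem.List.insertBy pvBefore x acc) [] := fun l => rfl
    rw [hs]
    have hh := pvHead_insertBy pvBefore
      (((fun a => (a, (orig.count a : Int))) x) :: t.map (fun a => (a, (orig.count a : Int)))) []
    rw [List.headD_eq_head?_getD, hh]
    show ((List.foldl _ (some ((fun a => (a, (orig.count a : Int))) x))
        (t.map (fun a => (a, (orig.count a : Int))))).getD ("", 0)).1 = _
    rw [pvFoldA_some]
    rw [pvMin_link]
    rfl
-- ===== VERDICT (by name: the statement is the Claim_ definition above) =====
theorem get_cluster_representatives_spec : Claim_equal_get_cluster_representatives := by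
  intro m orig _
  unfold Spec_get_cluster_representatives
  -- ---- A side ----
  set cta : PySem.Dict Int (List String) :=
    orig.foldl (fun d attr => d.modify (pvLookup m attr) [] (fun l => l ++ [attr])) PySem.Dict.empty with hcta
  have hkA : cta.keys = PySem.Set.ofList (orig.map (fun a => pvLookup m a)) := by
    have h := PySem.Dict.keys_foldl_modify_key orig (fun attr => pvLookup m attr) []
      (fun _ x => fun l => l ++ [x]) (PySem.Dict.empty : PySem.Dict Int (List String))
    rw [hcta]
    exact h.trans (by rw [PySem.Dict.keys_empty]; rfl)
  have hndA : cta.keys.Nodup := by rw [hkA]; exact PySem.Set.nodup_ofList _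
  have hgA : ∀ c, cta.getD c [] = orig.filter (fun a => pvLookup m a == c) := by
    intro c
    have hmap : cta = (orig.map (fun a => (pvLookup m a, a))).foldl
        (fun d p => d.modify p.1 [] (fun l => l ++ [p.2])) PySem.Dict.empty := by
      rw [hcta, List.foldl_map]
    rw [hmap, PySem.Dict.getD_foldl_modify_append, List.filter_map, List.map_map]
    simp [Function.comp_def]
  have hitemsA : cta.items = (PySem.Set.ofList (orig.map (fun a => pvLookup m a))).map
      (fun c => (c, orig.filter (fun a => pvLookup m a == c))) := by
    rw [PySem.Dict.items_eq_map_keys cta hndA [], hkA]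
    exact List.map_congr_left (fun c _ => by rw [hgA])
  have hresA : get_cluster_representatives m orig =
      (PySem.Set.ofList (orig.map (fun a => pvLookup m a))).map
        (fun c => (c, pvRepA (orig.filter (fun a => pvLookup m a == c)))) := by
    show (cta.items.foldl (fun r p => r.insert p.1 (pvRepA p.2)) PySem.Dict.empty).items = _
    rw [PySem.Dict.items_foldl_insert_fresh cta.items (fun p => p.1) (fun p => pvRepA p.2)
        PySem.Dict.empty (fun a _ => PySem.Dict.contains_empty _)
        (by rw [hitemsA, List.map_map]
            simpa [Function.comp_def] using
              PySem.Set.nodup_ofList (orig.map (fun a => pvLookup m a)))]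
    rw [hitemsA, List.map_map]
    rfl
  -- ---- B side ----
  set best : PySem.Dict Int ((Int × Int) × String) :=
    (PySem.Dict.counter orig).items.foldl (pvBodyB m) PySem.Dict.empty with hbest
  have halt : get_cluster_representatives_alt m orig =
      (best.items.foldl (fun d p => d.insert p.1 p.2.2) PySem.Dict.empty).items := rfl
  obtain ⟨hbk, hbg⟩ := pvBfold m (PySem.Dict.counter orig).items PySem.Dict.empty
  have hmapfst : (PySem.Dict.counter orig).items.map (fun p => pvLookup m p.1)
      = (PySem.Set.ofList orig).map (fun a => pvLookup m a) := by
    rw [PySem.Dict.items_counter, List.map_map]; rfl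
  have hkB : best.keys = PySem.Set.ofList (orig.map (fun a => pvLookup m a)) := by
    rw [hbest, hbk, PySem.Dict.keys_empty, hmapfst]
    exact pvOfList_map_ofList (fun a => pvLookup m a) orig
  have hndB : best.keys.Nodup := by rw [hkB]; exact PySem.Set.nodup_ofList _
  have hgB : ∀ c, best.get? c = pvOptFold none
      (((PySem.Set.ofList orig).filter (fun a => pvLookup m a == c)).map
        (fun a => (a, (orig.count a : Int)))) := by
    intro c
    rw [hbest, hbg c, PySem.Dict.get?_empty, PySem.Dict.items_counter, List.filter_map]
    rfl
  have hresB : get_cluster_representatives_alt m orig =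
      (PySem.Set.ofList (orig.map (fun a => pvLookup m a))).map
        (fun c => (c, (best.getD c ((0, 0), "")).2)) := by
    rw [halt]
    rw [PySem.Dict.items_foldl_insert_fresh best.items (fun p => p.1) (fun p => p.2.2)
        PySem.Dict.empty (fun a _ => PySem.Dict.contains_empty _) (by exact hndB)]
    rw [PySem.Dict.items_eq_map_keys best hndB ((0, 0), ""), hkB, List.map_map]
    rfl
  -- ---- combine ----
  rw [hresA, hresB]
  refine List.map_congr_left ?_
  intro c hcmem
  have hcm : c ∈ orig.map (fun a => pvLookup m a) :=
    (PySem.Set.mem_ofList _ c).mp hcmem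
  obtain ⟨v, hv, hrep⟩ := pvValue m orig c hcm
  have hgd : best.getD c ((0, 0), "") = v :=
    PySem.Dict.getD_of_get?_eq_some best _ ((hgB c).trans hv)
  rw [hgd, hrep]
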